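-- pv_equiv track=rewrite | github.com/yunhuijang/GEEL | data/data_utils.py | seq_rel_to_adj_list
-- ===== SOURCE A (Python) =====
-- def seq_rel_to_adj_list(seq_rel):
--     adj_list = []
--     cur_node_num = 0
--     tar_node = 1
--     for element in seq_rel:
--         if element != 0:
--             tar_node -= element
--             adj_list.append((cur_node_num, tar_node))
--         else:
--             cur_node_num += 1
--             tar_node = cur_node_num
--             continue
--     return adj_list
-- ===== SOURCE B (Python) =====
-- def seq_rel_to_adj_list(seq_rel):
--     # Phase 1: split on the 0 delimiters into segments; segment i's source node is i.
--     segs = []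
--     cur = []
--     for e in seq_rel:
--         if e == 0:
--             segs.append(cur)
--             cur = []
--         else:
--             cur.append(e)
--     segs.append(cur)
--     # Phase 2: emit edges per segment with a running target starting at max(i, 1).
--     out = []
--     for i, seg in enumerate(segs):
--         running = max(i, 1)
--         for e in seg:
--             running -= e
--             out.append((i, running))
--     return out
-- ===== Notes on version B (the rewrite author's own statement) =====
-- stated objective: alternative
-- what changed: B first partitions the input into segments at the 0 delimiters and then emits each segment's edges from a per-segment starting target max(i,1), instead of A's single pass threading cur_node/tar_node state across delimiters.
import Mathlib
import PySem

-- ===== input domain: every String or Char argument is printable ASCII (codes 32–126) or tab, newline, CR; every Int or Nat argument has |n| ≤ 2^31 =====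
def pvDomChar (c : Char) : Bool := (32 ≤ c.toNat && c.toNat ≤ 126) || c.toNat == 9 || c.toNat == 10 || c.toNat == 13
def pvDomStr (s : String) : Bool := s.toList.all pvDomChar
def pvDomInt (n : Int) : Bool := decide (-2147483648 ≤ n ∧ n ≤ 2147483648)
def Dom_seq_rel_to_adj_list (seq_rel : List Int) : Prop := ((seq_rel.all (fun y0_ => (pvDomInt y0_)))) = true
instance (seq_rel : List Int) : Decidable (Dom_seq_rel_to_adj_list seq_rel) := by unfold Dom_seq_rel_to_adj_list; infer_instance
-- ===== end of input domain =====

-- B partitions the input into segments at the 0 delimiters and emits each segment's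
-- edges from a per-segment start max(i,1), instead of A's single stateful pass
-- (objective: alternative decomposition, same O(n) cost).

-- ===== PORT A =====
-- state: (adj_list, cur_node_num, tar_node)
def seq_rel_to_adj_list (seq_rel : List Int) : List (Int × Int) :=
  (seq_rel.foldl
    (fun (st : List (Int × Int) × Int × Int) element =>
      if element ≠ 0 then
        (st.1 ++ [(st.2.1, st.2.2 - element)], st.2.1, st.2.2 - element)
      else
        (st.1, st.2.1 + 1, st.2.1 + 1))
    ([], 0, 1)).1

-- ===== PORT B =====
-- phase 1 of Source B: split on zeros; state (segs, cur)
def pvSplitStep (st : List (List Int) × List Int) (e : Int) : List (List Int) × List Int :=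
  if e = 0 then (st.1 ++ [st.2], []) else (st.1, st.2 ++ [e])

-- phase 2 inner loop of Source B: running target, appending (i, running)
def pvEmitStep (i : Int) (q : List (Int × Int) × Int) (e : Int) : List (Int × Int) × Int :=
  (q.1 ++ [(i, q.2 - e)], q.2 - e)

def seq_rel_to_adj_list_alt (seq_rel : List Int) : List (Int × Int) :=
  let st := seq_rel.foldl pvSplitStep ([], [])
  let segs := st.1 ++ [st.2]
  (PySem.List.enumerate segs).foldl
    (fun out (p : Int × List Int) =>
      out ++ (p.2.foldl (pvEmitStep p.1) ([], max p.1 1)).1) []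

-- ===== PRECONDITION & SPEC =====
def Spec_seq_rel_to_adj_list (seq_rel : List Int) (out : List (Int × Int)) : Prop := out = seq_rel_to_adj_list_alt seq_rel
instance (seq_rel : List Int) (out : List (Int × Int)) : Decidable (Spec_seq_rel_to_adj_list seq_rel out) := by unfold Spec_seq_rel_to_adj_list; infer_instance

-- ===== CLAIM (what is proved, stated in full; the proofs are below) =====
def Claim_equal_seq_rel_to_adj_list : Prop := ∀ (seq_rel : List Int), Dom_seq_rel_to_adj_list seq_rel → Spec_seq_rel_to_adj_list seq_rel (seq_rel_to_adj_list seq_rel)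

-- ===== LEMMAS AND PROOFS =====

-- A's loop as a structural recursion
def gA (cur tar : Int) : List Int → List (Int × Int)
  | [] => []
  | e :: r => if e ≠ 0 then (cur, tar - e) :: gA cur (tar - e) r
              else gA (cur + 1) (cur + 1) r

-- one segment's emitted edges, structurally
def eS (i r : Int) : List Int → List (Int × Int)
  | [] => []
  | e :: seg => (i, r - e) :: eS i (r - e) seg

-- the segments of seq, as (first segment, remaining segments)
def splitP : List Int → List Int × List (List Int)
  | [] => ([], [])
  | e :: r => if e = 0 then ([], (splitP r).1 :: (splitP r).2)
              else (e :: (splitP r).1, (splitP r).2)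

-- emitted edges of a list of segments, index starting at n
def gSeg (n : Int) : List (List Int) → List (Int × Int)
  | [] => []
  | s :: ss => eS n (max n 1) s ++ gSeg (n + 1) ss

theorem foldA_eq (seq : List Int) : ∀ (adj : List (Int × Int)) (cur tar : Int),
    (seq.foldl
      (fun (st : List (Int × Int) × Int × Int) element =>
        if element ≠ 0 then
          (st.1 ++ [(st.2.1, st.2.2 - element)], st.2.1, st.2.2 - element)
        else
          (st.1, st.2.1 + 1, st.2.1 + 1))
      (adj, cur, tar)).1 = adj ++ gA cur tar seq := by
  induction seq with
  | nil => intro adj cur tar; simp [gA]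
  | cons e r ih =>
      intro adj cur tar
      rw [List.foldl_cons, ih]
      by_cases he : e = 0
      · simp [he, gA]
      · simp [he, gA, List.append_assoc]

theorem foldSplit_eq (seq : List Int) : ∀ (segs : List (List Int)) (cur : List Int),
    (seq.foldl pvSplitStep (segs, cur)).1 ++ [(seq.foldl pvSplitStep (segs, cur)).2]
      = segs ++ (cur ++ (splitP seq).1) :: (splitP seq).2 := by
  induction seq with
  | nil => intro segs cur; simp [splitP]
  | cons e r ih =>
      intro segs cur
      by_cases he : e = 0
      · simp [he, pvSplitStep, splitP, ih]
      · simp [he, pvSplitStep, splitP, ih]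

theorem foldEmit_eq (i : Int) (seg : List Int) : ∀ (out : List (Int × Int)) (r : Int),
    (seg.foldl (pvEmitStep i) (out, r)).1 = out ++ eS i r seg := by
  induction seg with
  | nil => intro out r; simp [eS]
  | cons e rest ih =>
      intro out r
      simp [pvEmitStep, eS, ih, List.append_assoc]

theorem foldOuter_eq (segs : List (List Int)) : ∀ (n : Int) (out : List (Int × Int)),
    (PySem.List.enumerate segs n).foldl
      (fun out (p : Int × List Int) =>
        out ++ (p.2.foldl (pvEmitStep p.1) ([], max p.1 1)).1) out
      = out ++ gSeg n segs := by
  induction segs with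
  | nil => intro n out; simp [PySem.List.enumerate_nil, gSeg]
  | cons s ss ih =>
      intro n out
      rw [PySem.List.enumerate_cons, List.foldl_cons, ih]
      simp [gSeg, foldEmit_eq, List.append_assoc]

theorem main_eq (seq : List Int) : ∀ (n tar : Int), 0 ≤ n →
    gA n tar seq = eS n tar (splitP seq).1 ++ gSeg (n + 1) (splitP seq).2 := by
  induction seq with
  | nil => intro n tar _; simp [gA, splitP, eS, gSeg]
  | cons e r ih =>
      intro n tar hn
      by_cases he : e = 0
      · have hmax : max (n + 1) 1 = n + 1 := by omega
        simp [he, gA, splitP, eS, gSeg, hmax, ih (n + 1) (n + 1) (by omega)]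
      · simp [he, gA, splitP, eS, ih n (tar - e) hn]

-- ===== VERDICT (by name: the statement is the Claim_ definition above) =====
theorem seq_rel_to_adj_list_spec : Claim_equal_seq_rel_to_adj_list := by
  intro seq _
  unfold Spec_seq_rel_to_adj_list seq_rel_to_adj_list seq_rel_to_adj_list_alt
  rw [foldA_eq]
  have hs := foldSplit_eq seq [] []
  simp only [List.nil_append] at hs
  simp only [hs, foldOuter_eq]
  have := main_eq seq 0 1 (by omega)
  simpa [gSeg] using this
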